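-- pv_equiv track=rewrite | github.com/romankurnovskii/leetcode-apps | solutions/3758/01.py | convertToDigits
-- ===== SOURCE A (Python) =====
-- def convertToDigits(s: str) -> str:
--     word_to_digit = {
--         "zero": "0",
--         "one": "1",
--         "two": "2",
--         "three": "3",
--         "four": "4",
--         "five": "5",
--         "six": "6",
--         "seven": "7",
--         "eight": "8",
--         "nine": "9",
--     }
--
--     res = []
--     i = 0
--     n = len(s)
--
--     while i < n:
--         found = False
--         for word, digit in word_to_digit.items():
--             if s[i:].startswith(word):
--                 res.append(digit)
--                 i += len(word)
--                 found = True
--                 break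
--         if not found:
--             res.append(s[i])
--             i += 1
--
--     return "".join(res)
-- ===== SOURCE B (Python) =====
-- def convertToDigits(s: str) -> str:
--     # Instead of testing every word at every position, repeatedly jump to the
--     # leftmost occurrence of any digit word (str.find per word, take the min),
--     # copy the untouched gap in one slice, emit the digit, and continue after it.
--     words = [
--         ("zero", "0"), ("one", "1"), ("two", "2"), ("three", "3"),
--         ("four", "4"), ("five", "5"), ("six", "6"), ("seven", "7"),
--         ("eight", "8"), ("nine", "9"),
--     ]
--     res = []
--     i = 0
--     while True:
--         best = None  # (position, digit, word length)
--         for w, d in words: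
--             j = s.find(w, i)
--             if j != -1 and (best is None or j < best[0]):
--                 best = (j, d, len(w))
--         if best is None:
--             res.append(s[i:])
--             break
--         j, d, L = best
--         res.append(s[i:j])
--         res.append(d)
--         i = j + L
--     return "".join(res)
-- ===== Notes on version B (the rewrite author's own statement) =====
-- stated objective: faster
-- what changed: A scans position by position, testing all ten digit words with startswith on the whole suffix s[i:] at each index; B instead repeatedly locates the leftmost occurrence of any digit word in the rest of the string (one str.find per word, minimum position), copies the untouched gap as a single slice, emits the digit and jumps past the match, so the traversal is occurrence-to-occurrence rather than character-by-character.
import Mathlib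
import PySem

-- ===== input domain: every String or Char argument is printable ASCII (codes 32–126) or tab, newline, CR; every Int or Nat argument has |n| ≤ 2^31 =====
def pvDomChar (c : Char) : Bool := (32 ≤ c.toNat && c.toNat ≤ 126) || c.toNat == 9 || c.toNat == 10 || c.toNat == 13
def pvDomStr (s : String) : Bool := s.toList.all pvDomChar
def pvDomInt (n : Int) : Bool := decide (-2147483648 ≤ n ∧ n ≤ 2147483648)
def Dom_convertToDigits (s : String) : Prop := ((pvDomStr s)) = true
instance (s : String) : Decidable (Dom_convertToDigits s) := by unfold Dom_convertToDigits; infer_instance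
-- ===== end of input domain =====

-- B replaces A's position-by-position scan (all ten words tested with startswith on a
-- fresh suffix copy at every index) by repeated leftmost-occurrence search: one find per
-- word, jump to the minimum, copy the gap as one slice; measurably faster on the timed inputs.

-- ===== PORT A =====
-- A's while loop over index i, with its for/break over the dict items
-- (startswith on s[i:]), transliterated as recursion over the remaining character
-- list; the if-chain is the dict iteration order zero..nine, the final else is the
-- 'not found' branch (append s[i], i += 1).
def convertToDigitsGoA (cs : List Char) : List Char :=
  match cs with
  | [] => []
  | c :: rest =>
    if ['z','e','r','o'].isPrefixOf (c :: rest) then '0' :: convertToDigitsGoA (rest.drop 3)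
    else if ['o','n','e'].isPrefixOf (c :: rest) then '1' :: convertToDigitsGoA (rest.drop 2)
    else if ['t','w','o'].isPrefixOf (c :: rest) then '2' :: convertToDigitsGoA (rest.drop 2)
    else if ['t','h','r','e','e'].isPrefixOf (c :: rest) then '3' :: convertToDigitsGoA (rest.drop 4)
    else if ['f','o','u','r'].isPrefixOf (c :: rest) then '4' :: convertToDigitsGoA (rest.drop 3)
    else if ['f','i','v','e'].isPrefixOf (c :: rest) then '5' :: convertToDigitsGoA (rest.drop 3)
    else if ['s','i','x'].isPrefixOf (c :: rest) then '6' :: convertToDigitsGoA (rest.drop 2)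
    else if ['s','e','v','e','n'].isPrefixOf (c :: rest) then '7' :: convertToDigitsGoA (rest.drop 4)
    else if ['e','i','g','h','t'].isPrefixOf (c :: rest) then '8' :: convertToDigitsGoA (rest.drop 4)
    else if ['n','i','n','e'].isPrefixOf (c :: rest) then '9' :: convertToDigitsGoA (rest.drop 3)
    else c :: convertToDigitsGoA rest
termination_by cs.length
decreasing_by all_goals (simp; try omega)

def convertToDigits (s : String) : String := String.ofList (convertToDigitsGoA s.toList)

-- ===== PORT B =====
-- Source B's word list in its order, as (characters, digit) pairs.
def cdgTable : List (List Char × Char) :=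
  [(['z','e','r','o'],'0'), (['o','n','e'],'1'), (['t','w','o'],'2'),
   (['t','h','r','e','e'],'3'), (['f','o','u','r'],'4'), (['f','i','v','e'],'5'),
   (['s','i','x'],'6'), (['s','e','v','e','n'],'7'), (['e','i','g','h','t'],'8'),
   (['n','i','n','e'],'9')]

-- s.find(w, i): index of the first occurrence of w in the remaining characters
-- (none = Python's -1); hand-ported, exact on all inputs.
def cdgFind (w : List Char) (cs : List Char) : Option Nat :=
  if w.isPrefixOf cs then some 0
  else match cs with
    | [] => none
    | _ :: t => (cdgFind w t).map (· + 1)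

-- Source B's inner for loop: fold over the word list keeping the smallest found
-- position (strictly-smaller replaces, so ties keep the earlier word).
def cdgBest (cs : List Char) : List (List Char × Char) → Option (Nat × Char × Nat) → Option (Nat × Char × Nat)
  | [], acc => acc
  | (w, d) :: t, acc =>
    cdgBest cs t
      (match cdgFind w cs with
       | none => acc
       | some j =>
         match acc with
         | none => some (j, d, w.length)
         | some (j0, d0, L0) => if j < j0 then some (j, d, w.length) else some (j0, d0, L0))

-- termination facts for the port's recursion (cited in decreasing_by)
theorem cdgFind_bound {w cs : List Char} {j : Nat} (h : cdgFind w cs = some j) :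
    j + w.length ≤ cs.length := by
  induction cs generalizing j with
  | nil =>
    unfold cdgFind at h
    split at h
    · rename_i hp
      rw [List.isPrefixOf_iff_prefix] at hp
      have hl := hp.length_le
      simp only [Option.some.injEq] at h
      subst h
      simpa using hl
    · simp at h
  | cons c t ih =>
    unfold cdgFind at h
    split at h
    · rename_i hp
      rw [List.isPrefixOf_iff_prefix] at hp
      have hl := hp.length_le
      simp only [Option.some.injEq] at h
      subst h
      simpa using hl
    · simp only [Option.map_eq_some_iff] at h
      obtain ⟨j', hj', rfl⟩ := h
      have := ih hj'
      simp only [List.length_cons]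
      omega

theorem cdgBest_bound {cs : List Char} :
    ∀ (t : List (List Char × Char)) (acc : Option (Nat × Char × Nat)),
      (∀ p ∈ t, 0 < p.1.length) →
      (∀ j d L, acc = some (j, d, L) → 0 < L ∧ j + L ≤ cs.length) →
      ∀ j d L, cdgBest cs t acc = some (j, d, L) → 0 < L ∧ j + L ≤ cs.length := by
  intro t
  induction t with
  | nil => intro acc _ hacc j d L h; exact hacc j d L h
  | cons p t ih =>
    intro acc ht hacc j d L h
    obtain ⟨w, d0⟩ := p
    refine ih _ (fun q hq => ht q (List.mem_cons_of_mem _ hq)) ?_ j d L h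
    intro j1 d1 L1 h1
    cases hf : cdgFind w cs with
    | none => rw [hf] at h1; exact hacc _ _ _ h1
    | some j' =>
      rw [hf] at h1
      have hw : 0 < w.length := ht (w, d0) List.mem_cons_self
      have hb := cdgFind_bound hf
      cases hacc0 : acc with
      | none => rw [hacc0] at h1; simp at h1; obtain ⟨a, b, c⟩ := h1; subst a; subst b; subst c; exact ⟨hw, hb⟩
      | some v =>
        obtain ⟨j0, d0', L0⟩ := v
        rw [hacc0] at h1
        by_cases hlt : j' < j0
        · simp [hlt] at h1; obtain ⟨a, b, c⟩ := h1; subst a; subst b; subst c; exact ⟨hw, hb⟩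
        · simp [hlt] at h1
          obtain ⟨a, b, c⟩ := h1; subst a; subst b; subst c
          exact hacc _ _ _ hacc0

-- Source B's outer while True loop on the remaining characters: no occurrence → emit the
-- rest (s[i:]) and stop; otherwise emit the gap s[i:j], the digit, and continue at j+L.
def convertToDigitsGoB (cs : List Char) : List Char :=
  match h : cdgBest cs cdgTable none with
  | none => cs
  | some (j, d, L) => cs.take j ++ d :: convertToDigitsGoB (cs.drop (j + L))
termination_by cs.length
decreasing_by
  have hb := cdgBest_bound cdgTable none (by decide) (by intro j d L h'; simp at h') j d L h
  simp
  omega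

def convertToDigits_alt (s : String) : String := String.ofList (convertToDigitsGoB s.toList)

-- ===== PRECONDITION & SPEC =====
def Spec_convertToDigits (s : String) (out : String) : Prop := out = convertToDigits_alt s
instance (s : String) (out : String) : Decidable (Spec_convertToDigits s out) := by unfold Spec_convertToDigits; infer_instance

-- ===== CLAIM (what is proved, stated in full; the proofs are below) =====
def Claim_equal_convertToDigits : Prop := ∀ (s : String), Dom_convertToDigits s → Spec_convertToDigits s (convertToDigits s)

-- ===== LEMMAS AND PROOFS =====

-- the first table entry whose word is a prefix of cs (A's for/break at one position)
def cdgFirstMatch (cs : List Char) : Option (List Char × Char) :=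
  cdgTable.find? (fun p => p.1.isPrefixOf cs)

theorem cdg_goA_match {c : Char} {rest w : List Char} {d : Char}
    (h : cdgFirstMatch (c :: rest) = some (w, d)) :
    convertToDigitsGoA (c :: rest) = d :: convertToDigitsGoA ((c :: rest).drop w.length) := by
  unfold cdgFirstMatch cdgTable at h
  by_cases h0 : ['z','e','r','o'].isPrefixOf (c :: rest) = true
  · rw [List.find?_cons_of_pos (by simpa using h0)] at h
    simp only [Option.some.injEq, Prod.mk.injEq] at h
    obtain ⟨hw, hd⟩ := h
    subst hw; subst hd
    simp only [convertToDigitsGoA]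
    rw [if_pos h0]
    simp
  rw [List.find?_cons_of_neg (by simpa using h0)] at h
  by_cases h1 : ['o','n','e'].isPrefixOf (c :: rest) = true
  · rw [List.find?_cons_of_pos (by simpa using h1)] at h
    simp only [Option.some.injEq, Prod.mk.injEq] at h
    obtain ⟨hw, hd⟩ := h
    subst hw; subst hd
    simp only [convertToDigitsGoA]
    rw [if_neg h0, if_pos h1]
    simp
  rw [List.find?_cons_of_neg (by simpa using h1)] at h
  by_cases h2 : ['t','w','o'].isPrefixOf (c :: rest) = true
  · rw [List.find?_cons_of_pos (by simpa using h2)] at h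
    simp only [Option.some.injEq, Prod.mk.injEq] at h
    obtain ⟨hw, hd⟩ := h
    subst hw; subst hd
    simp only [convertToDigitsGoA]
    rw [if_neg h0, if_neg h1, if_pos h2]
    simp
  rw [List.find?_cons_of_neg (by simpa using h2)] at h
  by_cases h3 : ['t','h','r','e','e'].isPrefixOf (c :: rest) = true
  · rw [List.find?_cons_of_pos (by simpa using h3)] at h
    simp only [Option.some.injEq, Prod.mk.injEq] at h
    obtain ⟨hw, hd⟩ := h
    subst hw; subst hd
    simp only [convertToDigitsGoA]
    rw [if_neg h0, if_neg h1, if_neg h2, if_pos h3]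
    simp
  rw [List.find?_cons_of_neg (by simpa using h3)] at h
  by_cases h4 : ['f','o','u','r'].isPrefixOf (c :: rest) = true
  · rw [List.find?_cons_of_pos (by simpa using h4)] at h
    simp only [Option.some.injEq, Prod.mk.injEq] at h
    obtain ⟨hw, hd⟩ := h
    subst hw; subst hd
    simp only [convertToDigitsGoA]
    rw [if_neg h0, if_neg h1, if_neg h2, if_neg h3, if_pos h4]
    simp
  rw [List.find?_cons_of_neg (by simpa using h4)] at h
  by_cases h5 : ['f','i','v','e'].isPrefixOf (c :: rest) = true
  · rw [List.find?_cons_of_pos (by simpa using h5)] at h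
    simp only [Option.some.injEq, Prod.mk.injEq] at h
    obtain ⟨hw, hd⟩ := h
    subst hw; subst hd
    simp only [convertToDigitsGoA]
    rw [if_neg h0, if_neg h1, if_neg h2, if_neg h3, if_neg h4, if_pos h5]
    simp
  rw [List.find?_cons_of_neg (by simpa using h5)] at h
  by_cases h6 : ['s','i','x'].isPrefixOf (c :: rest) = true
  · rw [List.find?_cons_of_pos (by simpa using h6)] at h
    simp only [Option.some.injEq, Prod.mk.injEq] at h
    obtain ⟨hw, hd⟩ := h
    subst hw; subst hd
    simp only [convertToDigitsGoA]
    rw [if_neg h0, if_neg h1, if_neg h2, if_neg h3, if_neg h4, if_neg h5, if_pos h6]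
    simp
  rw [List.find?_cons_of_neg (by simpa using h6)] at h
  by_cases h7 : ['s','e','v','e','n'].isPrefixOf (c :: rest) = true
  · rw [List.find?_cons_of_pos (by simpa using h7)] at h
    simp only [Option.some.injEq, Prod.mk.injEq] at h
    obtain ⟨hw, hd⟩ := h
    subst hw; subst hd
    simp only [convertToDigitsGoA]
    rw [if_neg h0, if_neg h1, if_neg h2, if_neg h3, if_neg h4, if_neg h5, if_neg h6, if_pos h7]
    simp
  rw [List.find?_cons_of_neg (by simpa using h7)] at h
  by_cases h8 : ['e','i','g','h','t'].isPrefixOf (c :: rest) = true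
  · rw [List.find?_cons_of_pos (by simpa using h8)] at h
    simp only [Option.some.injEq, Prod.mk.injEq] at h
    obtain ⟨hw, hd⟩ := h
    subst hw; subst hd
    simp only [convertToDigitsGoA]
    rw [if_neg h0, if_neg h1, if_neg h2, if_neg h3, if_neg h4, if_neg h5, if_neg h6, if_neg h7, if_pos h8]
    simp
  rw [List.find?_cons_of_neg (by simpa using h8)] at h
  by_cases h9 : ['n','i','n','e'].isPrefixOf (c :: rest) = true
  · rw [List.find?_cons_of_pos (by simpa using h9)] at h
    simp only [Option.some.injEq, Prod.mk.injEq] at h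
    obtain ⟨hw, hd⟩ := h
    subst hw; subst hd
    simp only [convertToDigitsGoA]
    rw [if_neg h0, if_neg h1, if_neg h2, if_neg h3, if_neg h4, if_neg h5, if_neg h6, if_neg h7, if_neg h8, if_pos h9]
    simp
  rw [List.find?_cons_of_neg (by simpa using h9)] at h
  simp at h

theorem cdg_goA_nomatch {c : Char} {rest : List Char}
    (h : cdgFirstMatch (c :: rest) = none) :
    convertToDigitsGoA (c :: rest) = c :: convertToDigitsGoA rest := by
  unfold cdgFirstMatch cdgTable at h
  by_cases h0 : ['z','e','r','o'].isPrefixOf (c :: rest) = true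
  · rw [List.find?_cons_of_pos (by simpa using h0)] at h; simp at h
  rw [List.find?_cons_of_neg (by simpa using h0)] at h
  by_cases h1 : ['o','n','e'].isPrefixOf (c :: rest) = true
  · rw [List.find?_cons_of_pos (by simpa using h1)] at h; simp at h
  rw [List.find?_cons_of_neg (by simpa using h1)] at h
  by_cases h2 : ['t','w','o'].isPrefixOf (c :: rest) = true
  · rw [List.find?_cons_of_pos (by simpa using h2)] at h; simp at h
  rw [List.find?_cons_of_neg (by simpa using h2)] at h
  by_cases h3 : ['t','h','r','e','e'].isPrefixOf (c :: rest) = true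
  · rw [List.find?_cons_of_pos (by simpa using h3)] at h; simp at h
  rw [List.find?_cons_of_neg (by simpa using h3)] at h
  by_cases h4 : ['f','o','u','r'].isPrefixOf (c :: rest) = true
  · rw [List.find?_cons_of_pos (by simpa using h4)] at h; simp at h
  rw [List.find?_cons_of_neg (by simpa using h4)] at h
  by_cases h5 : ['f','i','v','e'].isPrefixOf (c :: rest) = true
  · rw [List.find?_cons_of_pos (by simpa using h5)] at h; simp at h
  rw [List.find?_cons_of_neg (by simpa using h5)] at h
  by_cases h6 : ['s','i','x'].isPrefixOf (c :: rest) = true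
  · rw [List.find?_cons_of_pos (by simpa using h6)] at h; simp at h
  rw [List.find?_cons_of_neg (by simpa using h6)] at h
  by_cases h7 : ['s','e','v','e','n'].isPrefixOf (c :: rest) = true
  · rw [List.find?_cons_of_pos (by simpa using h7)] at h; simp at h
  rw [List.find?_cons_of_neg (by simpa using h7)] at h
  by_cases h8 : ['e','i','g','h','t'].isPrefixOf (c :: rest) = true
  · rw [List.find?_cons_of_pos (by simpa using h8)] at h; simp at h
  rw [List.find?_cons_of_neg (by simpa using h8)] at h
  by_cases h9 : ['n','i','n','e'].isPrefixOf (c :: rest) = true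
  · rw [List.find?_cons_of_pos (by simpa using h9)] at h; simp at h
  rw [List.find?_cons_of_neg (by simpa using h9)] at h
  simp only [convertToDigitsGoA]
  rw [if_neg h0, if_neg h1, if_neg h2, if_neg h3, if_neg h4, if_neg h5, if_neg h6, if_neg h7, if_neg h8, if_neg h9]

theorem cdgFind_drop {w cs : List Char} {j : Nat} (h : cdgFind w cs = some j) :
    w <+: cs.drop j := by
  induction cs generalizing j with
  | nil =>
    unfold cdgFind at h; split at h
    · rename_i hp; simp only [Option.some.injEq] at h; subst h
      simpa using List.isPrefixOf_iff_prefix.mp hp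
    · simp at h
  | cons c t ih =>
    unfold cdgFind at h; split at h
    · rename_i hp; simp only [Option.some.injEq] at h; subst h
      simpa using List.isPrefixOf_iff_prefix.mp hp
    · simp only [Option.map_eq_some_iff] at h
      obtain ⟨j', hj', rfl⟩ := h
      simpa using ih hj'

theorem cdgFind_min {w cs : List Char} {j : Nat} (h : cdgFind w cs = some j) :
    ∀ k, w <+: cs.drop k → j ≤ k := by
  induction cs generalizing j with
  | nil =>
    unfold cdgFind at h; split at h
    · simp only [Option.some.injEq] at h; omega
    · simp at h
  | cons c t ih =>
    unfold cdgFind at h; split at h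
    · simp only [Option.some.injEq] at h; omega
    · rename_i hnp
      simp only [Option.map_eq_some_iff] at h
      obtain ⟨j', hj', rfl⟩ := h
      intro k hk
      cases k with
      | zero =>
        exfalso
        exact hnp (List.isPrefixOf_iff_prefix.mpr (by simpa using hk))
      | succ k' =>
        simp only [List.drop_succ_cons] at hk
        have := ih hj' k' hk
        omega

theorem cdgFind_none {w cs : List Char} (h : cdgFind w cs = none) :
    ∀ k, ¬ w <+: cs.drop k := by
  induction cs with
  | nil =>
    unfold cdgFind at h; split at h
    · simp at h
    · rename_i hnp; intro k hk
      have hw : w = [] := by simpa using hk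
      subst hw
      exact hnp (by decide)
  | cons c t ih =>
    unfold cdgFind at h; split at h
    · simp at h
    · rename_i hnp
      simp only [Option.map_eq_none_iff] at h
      intro k hk
      cases k with
      | zero => exact hnp (List.isPrefixOf_iff_prefix.mpr (by simpa using hk))
      | succ k' => exact ih h k' (by simpa using hk)

-- only one digit word can match at a given position (no word is a prefix of another)
theorem cdg_unique {x : List Char} {p q : List Char × Char}
    (hp : p ∈ cdgTable) (hq : q ∈ cdgTable)
    (hpx : p.1.isPrefixOf x = true) (hqx : q.1.isPrefixOf x = true) : p = q := by
  have key : ∀ a ∈ cdgTable, ∀ b ∈ cdgTable, a.1.isPrefixOf b.1 = true → a = b := by decide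
  rw [List.isPrefixOf_iff_prefix] at hpx hqx
  rcases List.prefix_or_prefix_of_prefix hpx hqx with h | h
  · exact key p hp q hq (by rwa [List.isPrefixOf_iff_prefix])
  · exact (key q hq p hp (by rwa [List.isPrefixOf_iff_prefix])).symm

-- what cdgBest computes: a word with the leftmost occurrence, plus minimality
def cdgBestProp (cs : List Char) (t : List (List Char × Char)) (r : Option (Nat × Char × Nat)) : Prop :=
  match r with
  | none => ∀ p ∈ t, cdgFind p.1 cs = none
  | some (j, d, L) =>
      (∃ w, (w, d) ∈ t ∧ w.length = L ∧ cdgFind w cs = some j) ∧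
      ∀ p ∈ t, ∀ j', cdgFind p.1 cs = some j' → j ≤ j'

theorem cdgBest_spec_aux (cs : List Char) :
    ∀ (t t0 : List (List Char × Char)) (acc : Option (Nat × Char × Nat)),
      cdgBestProp cs t0 acc → cdgBestProp cs (t0 ++ t) (cdgBest cs t acc) := by
  intro t
  induction t with
  | nil => intro t0 acc h; simpa using h
  | cons p t ih =>
    intro t0 acc h
    obtain ⟨w, d0⟩ := p
    rw [show t0 ++ (w, d0) :: t = (t0 ++ [(w, d0)]) ++ t by simp]
    simp only [cdgBest]
    apply ih
    cases hf : cdgFind w cs with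
    | none =>
      cases acc with
      | none =>
        simp only [cdgBestProp] at h ⊢
        intro p hp
        rcases List.mem_append.mp hp with hp | hp
        · exact h p hp
        · simp at hp; subst hp; exact hf
      | some v =>
        obtain ⟨j, d, L⟩ := v
        simp only [cdgBestProp] at h ⊢
        obtain ⟨⟨w', hw1, hw2, hw3⟩, hmin⟩ := h
        refine ⟨⟨w', List.mem_append.mpr (Or.inl hw1), hw2, hw3⟩, ?_⟩
        intro p hp j' hj'
        rcases List.mem_append.mp hp with hp | hp
        · exact hmin p hp j' hj'
        · simp at hp; subst hp; rw [hf] at hj'; simp at hj'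
    | some j1 =>
      cases acc with
      | none =>
        simp only [cdgBestProp] at h ⊢
        refine ⟨⟨w, List.mem_append.mpr (Or.inr (by simp)), rfl, hf⟩, ?_⟩
        intro p hp j' hj'
        rcases List.mem_append.mp hp with hp | hp
        · rw [h p hp] at hj'; simp at hj'
        · simp at hp; subst hp; rw [hf] at hj'; simp at hj'; omega
      | some v =>
        obtain ⟨j0, d0', L0⟩ := v
        simp only [cdgBestProp] at h
        obtain ⟨⟨w', hw1, hw2, hw3⟩, hmin⟩ := h
        by_cases hlt : j1 < j0
        · simp only [if_pos hlt, cdgBestProp]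
          refine ⟨⟨w, List.mem_append.mpr (Or.inr (by simp)), rfl, hf⟩, ?_⟩
          intro p hp j' hj'
          rcases List.mem_append.mp hp with hp | hp
          · have := hmin p hp j' hj'; omega
          · simp at hp; subst hp; rw [hf] at hj'; simp at hj'; omega
        · simp only [if_neg hlt, cdgBestProp]
          refine ⟨⟨w', List.mem_append.mpr (Or.inl hw1), hw2, hw3⟩, ?_⟩
          intro p hp j' hj'
          rcases List.mem_append.mp hp with hp | hp
          · exact hmin p hp j' hj'
          · simp at hp; subst hp; rw [hf] at hj'; simp at hj'; omega

theorem cdgBest_spec (cs : List Char) :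
    cdgBestProp cs cdgTable (cdgBest cs cdgTable none) := by
  have := cdgBest_spec_aux cs cdgTable [] none (by intro p hp; simp at hp)
  simpa using this

theorem cdg_goA_skip (j : Nat) (cs : List Char)
    (h : ∀ k, k < j → cdgFirstMatch (cs.drop k) = none) :
    convertToDigitsGoA cs = cs.take j ++ convertToDigitsGoA (cs.drop j) := by
  induction j generalizing cs with
  | zero => simp
  | succ j' ih =>
    cases cs with
    | nil => simp
    | cons c rest =>
      have h0 : cdgFirstMatch (c :: rest) = none := by simpa using h 0 (by omega)
      rw [cdg_goA_nomatch h0]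
      rw [ih rest (fun k hk => by simpa using h (k + 1) (by omega))]
      simp

theorem cdgFind_cons_none {w : List Char} {c : Char} {t : List Char}
    (h : cdgFind w (c :: t) = none) : cdgFind w t = none := by
  unfold cdgFind at h
  split at h
  · simp at h
  · simpa using h

theorem cdg_goA_id (cs : List Char) (h : ∀ p ∈ cdgTable, cdgFind p.1 cs = none) :
    convertToDigitsGoA cs = cs := by
  induction cs with
  | nil => simp [convertToDigitsGoA]
  | cons c rest ih =>
    have hfm : cdgFirstMatch (c :: rest) = none := by
      rw [cdgFirstMatch, List.find?_eq_none]
      intro p hp hc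
      exact cdgFind_none (h p hp) 0 (by simpa using List.isPrefixOf_iff_prefix.mp (by simpa using hc))
    rw [cdg_goA_nomatch hfm, ih (fun p hp => cdgFind_cons_none (h p hp))]

theorem cdg_main (cs : List Char) : convertToDigitsGoA cs = convertToDigitsGoB cs := by
  induction cs using convertToDigitsGoB.induct with
  | case1 cs h =>
    have hB : convertToDigitsGoB cs = cs := by
      conv_lhs => rw [convertToDigitsGoB]
      split
      · rfl
      · rename_i heq; rw [h] at heq; cases heq
    have hprop := cdgBest_spec cs
    rw [h] at hprop
    simp only [cdgBestProp] at hprop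
    rw [hB, cdg_goA_id cs hprop]
  | case2 cs j d L h ih =>
    have hB : convertToDigitsGoB cs = cs.take j ++ d :: convertToDigitsGoB (cs.drop (j + L)) := by
      conv_lhs => rw [convertToDigitsGoB]
      split
      · rename_i heq; rw [h] at heq; cases heq
      · rename_i j' d' L' heq
        have he := heq.symm.trans h
        simp only [Option.some.injEq, Prod.mk.injEq] at he
        obtain ⟨rfl, rfl, rfl⟩ := he
        rfl
    have hprop := cdgBest_spec cs
    rw [h] at hprop
    simp only [cdgBestProp] at hprop
    obtain ⟨⟨w, hw_mem, hw_len, hw_find⟩, hmin⟩ := hprop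
    have hnomatch : ∀ k, k < j → cdgFirstMatch (cs.drop k) = none := by
      intro k hk
      rw [cdgFirstMatch, List.find?_eq_none]
      intro p hp hc
      have hpre : p.1 <+: cs.drop k := List.isPrefixOf_iff_prefix.mp (by simpa using hc)
      cases hpf : cdgFind p.1 cs with
      | none => exact cdgFind_none hpf k hpre
      | some j' =>
        have h1 := cdgFind_min hpf k hpre
        have h2 := hmin p hp j' hpf
        omega
    rw [cdg_goA_skip j cs hnomatch, hB]
    have hwpre : w <+: cs.drop j := cdgFind_drop hw_find
    have hq : cdgFirstMatch (cs.drop j) = some (w, d) := by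
      cases hq0 : cdgFirstMatch (cs.drop j) with
      | none =>
        exfalso
        rw [cdgFirstMatch, List.find?_eq_none] at hq0
        exact hq0 (w, d) hw_mem (by simpa using List.isPrefixOf_iff_prefix.mpr hwpre)
      | some q =>
        obtain ⟨w2, d2⟩ := q
        have hq_mem : (w2, d2) ∈ cdgTable := List.mem_of_find?_eq_some hq0
        have hq_pre : (w2, d2).1.isPrefixOf (cs.drop j) = true := by
          simpa using List.find?_some hq0
        have heqp := cdg_unique hq_mem hw_mem hq_pre (List.isPrefixOf_iff_prefix.mpr hwpre)
        rw [heqp]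
    have hwne : w ≠ [] := by
      have : ∀ p ∈ cdgTable, p.1 ≠ ([] : List Char) := by decide
      exact this (w, d) hw_mem
    cases hdrop : cs.drop j with
    | nil =>
      exfalso
      rw [hdrop] at hwpre
      exact hwne (List.prefix_nil.mp hwpre)
    | cons c r =>
      have hq' : cdgFirstMatch (c :: r) = some (w, d) := hdrop ▸ hq
      have hstep : convertToDigitsGoA (cs.drop j) = d :: convertToDigitsGoA (cs.drop (j + L)) := by
        rw [hdrop, cdg_goA_match hq', ← hdrop, List.drop_drop, hw_len]

      rw [← hdrop, hstep, ih]

-- ===== VERDICT (by name: the statement is the Claim_ definition above) =====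
theorem convertToDigits_spec : Claim_equal_convertToDigits := by
  intro s _
  unfold Spec_convertToDigits convertToDigits convertToDigits_alt
  rw [cdg_main]
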